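-- pv_equiv track=rewrite | github.com/cldborges/telegram-forwarder_auto | funcoes.py | calcular_sequencia_atual
-- ===== SOURCE A (Python) =====
-- def calcular_sequencia_atual(resultados, categoria):
--     tempo_sem_numero = 0
--     numeros_seguidos = 0
--     for resultado in resultados:
--         if resultado in categoria:
--             tempo_sem_numero = 0
--             numeros_seguidos +=1
--         else:
--             tempo_sem_numero += 1
--             numeros_seguidos = 0
--     return numeros_seguidos, tempo_sem_numero
-- ===== SOURCE B (Python) =====
-- def calcular_sequencia_atual(resultados, categoria):
--     # Different decomposition: scan the tail run from the end instead of
--     # maintaining two live reset counters over the whole list.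
--     if not resultados:
--         return 0, 0
--     cat = set(categoria)
--     last_in = resultados[-1] in cat
--     run = 0
--     for r in reversed(resultados):
--         if (r in cat) != last_in:
--             break
--         run += 1
--     return (run, 0) if last_in else (0, run)
-- ===== Notes on version B (the rewrite author's own statement) =====
-- stated objective: faster
-- what changed: B classifies the last element's membership once against a hash set and counts the trailing run by a backward scan that stops at the first membership change, instead of A's forward pass over the whole list with a linear membership test per element and two continuously-reset counters.
import Mathlib
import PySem

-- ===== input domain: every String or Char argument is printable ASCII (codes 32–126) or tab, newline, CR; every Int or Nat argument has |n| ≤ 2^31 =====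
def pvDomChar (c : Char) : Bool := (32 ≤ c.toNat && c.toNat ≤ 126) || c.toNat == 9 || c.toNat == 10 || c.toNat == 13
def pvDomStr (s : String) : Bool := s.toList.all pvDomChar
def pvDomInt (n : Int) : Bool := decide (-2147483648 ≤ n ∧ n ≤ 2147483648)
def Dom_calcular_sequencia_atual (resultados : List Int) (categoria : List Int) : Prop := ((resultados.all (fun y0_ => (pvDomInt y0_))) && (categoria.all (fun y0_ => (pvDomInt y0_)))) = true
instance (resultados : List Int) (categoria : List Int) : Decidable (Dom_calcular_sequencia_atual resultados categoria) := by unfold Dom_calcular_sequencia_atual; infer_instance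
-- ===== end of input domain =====

-- B computes the same final-streak pair by classifying the last element once and
-- counting the trailing run backwards, instead of A's forward pass with two reset counters.


-- ===== PORT A =====
def calcular_sequencia_atual (resultados : List Int) (categoria : List Int) : Int × Int :=
  -- state = (tempo_sem_numero, numeros_seguidos)
  let s := resultados.foldl
    (fun (st : Int × Int) resultado =>
      if categoria.contains resultado then (0, st.2 + 1) else (st.1 + 1, 0))
    (0, 0)
  (s.2, s.1)

-- ===== PORT B =====
-- the 'for … break' loop of Source B: count while membership equals lastIn, stop at first change
def pvRunLen (cat : PySem.Set Int) (lastIn : Bool) : List Int → Int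
  | [] => 0
  | r :: rest => if (PySem.Set.contains cat r) ≠ lastIn then 0 else pvRunLen cat lastIn rest + 1

def calcular_sequencia_atual_alt (resultados : List Int) (categoria : List Int) : Int × Int :=
  match PySem.List.pyGet? resultados (-1) with
  | none => (0, 0)          -- 'if not resultados: return 0, 0'
  | some last =>
    let cat := PySem.Set.ofList categoria
    let lastIn := PySem.Set.contains cat last
    let run := pvRunLen cat lastIn resultados.reverse
    if lastIn then (run, 0) else (0, run)

-- ===== PRECONDITION & SPEC =====
def Spec_calcular_sequencia_atual (resultados : List Int) (categoria : List Int) (out : Int × Int) : Prop := out = calcular_sequencia_atual_alt resultados categoria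
instance (resultados : List Int) (categoria : List Int) (out : Int × Int) : Decidable (Spec_calcular_sequencia_atual resultados categoria out) := by unfold Spec_calcular_sequencia_atual; infer_instance

-- ===== CLAIM (what is proved, stated in full; the proofs are below) =====
def Claim_equal_calcular_sequencia_atual : Prop := ∀ (resultados : List Int) (categoria : List Int), Dom_calcular_sequencia_atual resultados categoria → Spec_calcular_sequencia_atual resultados categoria (calcular_sequencia_atual resultados categoria)

-- ===== LEMMAS AND PROOFS =====

-- invariant: A's fold state is exactly the two trailing-run lengths of the reversed prefix
theorem fold_eq_runs (categoria : List Int) (xs : List Int) :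
    xs.foldl
      (fun (st : Int × Int) resultado =>
        if categoria.contains resultado then (0, st.2 + 1) else (st.1 + 1, 0))
      (0, 0)
    = (pvRunLen (PySem.Set.ofList categoria) false xs.reverse,
       pvRunLen (PySem.Set.ofList categoria) true xs.reverse) := by
  induction xs using List.reverseRecOn with
  | nil => simp [pvRunLen]
  | append_singleton ys x ih =>
    rw [List.foldl_append, ih]
    by_cases h : x ∈ categoria
    · simp [pvRunLen, h]
    · simp [pvRunLen, h]

-- ===== VERDICT (by name: the statement is the Claim_ definition above) =====
theorem calcular_sequencia_atual_spec : Claim_equal_calcular_sequencia_atual := by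
  intro resultados categoria _
  unfold Spec_calcular_sequencia_atual calcular_sequencia_atual calcular_sequencia_atual_alt
  rcases List.eq_nil_or_concat resultados with hr | ⟨ys, last, hsplit⟩
  · subst hr; simp [PySem.List.pyGet?]
  · rw [List.concat_eq_append] at hsplit
    have hget : PySem.List.pyGet? resultados (-1) = some last := by
      subst hsplit
      simp [PySem.List.pyGet?, PySem.List.pyIdx?]
    rw [hget, fold_eq_runs]
    subst hsplit
    simp only [List.reverse_append, List.reverse_cons, List.reverse_nil, List.nil_append,
      List.cons_append, List.nil_append]
    by_cases h : last ∈ categoria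
    · simp [pvRunLen, h]
    · simp [pvRunLen, h]
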